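-- pv_equiv track=rewrite | github.com/Brandon-Soledad/A.I-Pentago | Pentago.py | utilityValue
-- ===== SOURCE A (Python) =====
-- def utilityValue(lines, aiColor, playerColor):
--     values = [0, 1, 10, 100, 1000, 1000]
--     utility = 0
--     for line in lines:
--         if(len(line) > 1):
--             count = 0
--             for i in range(1, len(line)):
--                 if(line[i-1] == line[i]):
--                     count += 1
--                 else:
--                     if(line[i-1] == aiColor):
--                         utility += values[count]
--                     elif(line[i-1] == playerColor):
--                         utility -= values[count]
--                     count = 0
--             if(count != 0):
--                 if(line[i-1] == aiColor):
--                     utility += values[count]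
--                 elif(line[i-1] == playerColor):
--                     utility -= values[count]
--     return utility
-- ===== SOURCE B (Python) =====
-- def _runs(line):
--     """Run-length encode line into (value, run length) pairs of maximal runs."""
--     runs = []
--     i, n = 0, len(line)
--     while i < n:
--         j = i + 1
--         while j < n and line[j] == line[i]:
--             j += 1
--         runs.append((line[i], j - i))
--         i = j
--     return runs
--
--
-- def utilityValue(lines, aiColor, playerColor):
--     values = [0, 1, 10, 100, 1000, 1000]
--     total = 0
--     for line in lines:
--         for c, length in _runs(line):
--             if c == aiColor:
--                 total += values[length - 1]
--             elif c == playerColor: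
--                 total -= values[length - 1]
--     return total
-- ===== Notes on version B (the rewrite author's own statement) =====
-- stated objective: simpler
-- what changed: B run-length-encodes each line into (value, length) runs and scores every run uniformly via values[length-1], removing A's adjacent-pair counter, its end-of-loop fixup branch and the len>1 guard.
import Mathlib
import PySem

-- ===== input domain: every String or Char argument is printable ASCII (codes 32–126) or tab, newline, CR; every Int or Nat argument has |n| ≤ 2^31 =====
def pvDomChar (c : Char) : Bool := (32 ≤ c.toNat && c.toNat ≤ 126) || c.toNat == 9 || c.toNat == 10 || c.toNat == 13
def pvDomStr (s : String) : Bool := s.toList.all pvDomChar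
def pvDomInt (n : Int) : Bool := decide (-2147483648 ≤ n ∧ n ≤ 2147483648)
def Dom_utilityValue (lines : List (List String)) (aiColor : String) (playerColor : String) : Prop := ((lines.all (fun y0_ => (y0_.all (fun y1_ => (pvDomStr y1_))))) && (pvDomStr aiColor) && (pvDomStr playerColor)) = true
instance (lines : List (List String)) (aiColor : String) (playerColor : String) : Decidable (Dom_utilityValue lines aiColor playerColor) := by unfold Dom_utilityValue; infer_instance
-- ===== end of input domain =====

-- B replaces A's fused adjacent-pair counter (with its end-of-loop fixup and len>1 guard) by
-- run-length encoding each line and scoring every run uniformly; objective: simpler.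

-- ===== PORT A =====
-- values[count]: ported with getD 0; exact under Pre_ (Python raises IndexError out of range).
def pvVal (k : Nat) : Int := ([0, 1, 10, 100, 1000, 1000] : List Int).getD k 0

def utilityValue (lines : List (List String)) (aiColor : String) (playerColor : String) : Int :=
  lines.foldl (fun utility line =>
    if line.length > 1 then
      -- for i in range(1, len(line)) with state (count, utility); indices always in range, so pyGetD is exact
      let s := (PySem.List.pyRange 1 (line.length : Int) 1).foldl
        (fun (s : Nat × Int) (i : Int) =>
          if PySem.List.pyGetD line (i - 1) "" == PySem.List.pyGetD line i "" then
            (s.1 + 1, s.2)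
          else if PySem.List.pyGetD line (i - 1) "" == aiColor then
            (0, s.2 + pvVal s.1)
          else if PySem.List.pyGetD line (i - 1) "" == playerColor then
            (0, s.2 - pvVal s.1)
          else (0, s.2)) (0, utility)
      -- after the loop i = len(line) - 1, so line[i-1] is line[len-2]
      if s.1 ≠ 0 then
        if PySem.List.pyGetD line ((line.length : Int) - 2) "" == aiColor then s.2 + pvVal s.1
        else if PySem.List.pyGetD line ((line.length : Int) - 2) "" == playerColor then s.2 - pvVal s.1
        else s.2
      else s.2
    else utility) 0

-- ===== PORT B =====
-- _runs: the outer while consumes one maximal run per iteration (here: recursion on the remaining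
-- suffix), the inner while counts the run's extent (here: pvRunLen).
def pvRunLen (c : String) : List String → Nat
  | [] => 0
  | x :: xs => if x == c then pvRunLen c xs + 1 else 0

def pvRuns : List String → List (String × Nat)
  | [] => []
  | c :: rest =>
    let r := pvRunLen c rest
    (c, r + 1) :: pvRuns (rest.drop r)
termination_by l => l.length
decreasing_by simp

def utilityValue_alt (lines : List (List String)) (aiColor : String) (playerColor : String) : Int :=
  lines.foldl (fun total line =>
    (pvRuns line).foldl (fun total g =>
      if g.1 == aiColor then total + pvVal (g.2 - 1)
      else if g.1 == playerColor then total - pvVal (g.2 - 1)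
      else total) total) 0

-- ===== PRECONDITION & SPEC =====
-- Pre_ excludes exactly the inputs on which the Python A raises IndexError (values[count] with
-- count ≥ 6): some line contains 7 consecutive equal cells whose value is aiColor or playerColor.
-- (B raises IndexError there too.)
def Pre_utilityValue (lines : List (List String)) (aiColor : String) (playerColor : String) : Prop :=
  ∀ line ∈ lines, ∀ i < line.length,
    ¬ (i + 7 ≤ line.length ∧ (∀ j < 7, line.getD (i + j) "" = line.getD i "")
       ∧ (line.getD i "" = aiColor ∨ line.getD i "" = playerColor))
instance (lines : List (List String)) (aiColor : String) (playerColor : String) : Decidable (Pre_utilityValue lines aiColor playerColor) := by unfold Pre_utilityValue; infer_instance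

def pvWitness_utilityValue : List (List String) × String × String :=
  ([["B", "B", "W"], ["W"], []], "B", "W")

def Spec_utilityValue (lines : List (List String)) (aiColor : String) (playerColor : String) (out : Int) : Prop := out = utilityValue_alt lines aiColor playerColor
instance (lines : List (List String)) (aiColor : String) (playerColor : String) (out : Int) : Decidable (Spec_utilityValue lines aiColor playerColor out) := by unfold Spec_utilityValue; infer_instance

-- ===== CLAIM (what is proved, stated in full; the proofs are below) =====
def Claim_equal_utilityValue : Prop := ∀ (lines : List (List String)) (aiColor : String) (playerColor : String), Dom_utilityValue lines aiColor playerColor → Pre_utilityValue lines aiColor playerColor → Spec_utilityValue lines aiColor playerColor (utilityValue lines aiColor playerColor)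

-- ===== LEMMAS AND PROOFS =====

-- Structural rendering of A's inner index loop: prev is line[i-1], the list is line[i:].
def scanA (ai pl : String) : String → List String → Nat → Int → Nat × Int
  | _, [], count, u => (count, u)
  | prev, x :: xs, count, u =>
    if prev == x then scanA ai pl x xs (count + 1) u
    else if prev == ai then scanA ai pl x xs 0 (u + pvVal count)
    else if prev == pl then scanA ai pl x xs 0 (u - pvVal count)
    else scanA ai pl x xs 0 u

-- scanA fused with A's final fixup (pvVal 0 = 0 makes the unconditional base correct).
def scanFin (ai pl : String) : String → List String → Nat → Int → Int
  | prev, [], count, u =>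
    if prev == ai then u + pvVal count else if prev == pl then u - pvVal count else u
  | prev, x :: xs, count, u =>
    if prev == x then scanFin ai pl x xs (count + 1) u
    else if prev == ai then scanFin ai pl x xs 0 (u + pvVal count)
    else if prev == pl then scanFin ai pl x xs 0 (u - pvVal count)
    else scanFin ai pl x xs 0 u

-- Run grouping with an open current run (c seen n+1 times so far).
def runsGo (c : String) (n : Nat) : List String → List (String × Nat)
  | [] => [(c, n)]
  | x :: xs => if x == c then runsGo c (n + 1) xs else (c, n) :: runsGo x 1 xs

theorem pvRuns_nil : pvRuns [] = [] := by
  rw [pvRuns.eq_def]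

theorem pvRuns_cons' (c : String) (rest : List String) :
    pvRuns (c :: rest) = (c, pvRunLen c rest + 1) :: pvRuns (rest.drop (pvRunLen c rest)) := by
  rw [pvRuns.eq_def]

theorem runsGo_eq (xs : List String) (c : String) (n : Nat) :
    runsGo c n xs = (c, n + pvRunLen c xs) :: pvRuns (xs.drop (pvRunLen c xs)) := by
  induction xs generalizing c n with
  | nil => simp [runsGo, pvRunLen, pvRuns_nil]
  | cons x xs ih =>
    by_cases h : x = c
    · subst h
      simp [runsGo, pvRunLen, ih, Nat.add_assoc, Nat.add_comm 1 (pvRunLen x xs)]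
    · simp [runsGo, pvRunLen, h, ih, pvRuns_cons', Nat.add_comm]

theorem pvRuns_cons (c : String) (xs : List String) :
    pvRuns (c :: xs) = runsGo c 1 xs := by
  rw [runsGo_eq, pvRuns_cons', Nat.add_comm]

theorem pvVal_zero : pvVal 0 = 0 := rfl

-- B's inner fold over an open run equals scanFin.
theorem foldB_runsGo (ai pl : String) (xs : List String) (c : String) (n : Nat) (u : Int) :
    (runsGo c (n + 1) xs).foldl (fun total g =>
      if g.1 == ai then total + pvVal (g.2 - 1)
      else if g.1 == pl then total - pvVal (g.2 - 1)
      else total) u = scanFin ai pl c xs n u := by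
  induction xs generalizing c n u with
  | nil => simp [runsGo, scanFin]
  | cons x xs ih =>
    by_cases h : x = c
    · subst h
      simp only [runsGo, beq_self_eq_true, if_true, scanFin]
      exact ih x (n + 1) u
    · have hb : (x == c) = false := by simpa using h
      have hb' : (c == x) = false := by simpa using (Ne.symm h)
      simp only [runsGo, hb, scanFin, hb']
      by_cases ha : c = ai
      · subst ha
        simpa using ih x 0 (u + pvVal n)
      · by_cases hp : c = pl
        · subst hp
          simpa [ha] using ih x 0 (u - pvVal n)
        · simpa [ha, hp] using ih x 0 u

-- A's index loop over pyRange equals scanA.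
theorem foldA_idx (ai pl : String) (line : List String) (m : Nat) :
    ∀ (k : Nat), 1 ≤ k → k ≤ line.length → line.length - k = m →
    ∀ (count : Nat) (u : Int),
    (PySem.List.pyRange (k : Int) (line.length : Int) 1).foldl
      (fun (s : Nat × Int) (i : Int) =>
        if PySem.List.pyGetD line (i - 1) "" == PySem.List.pyGetD line i "" then
          (s.1 + 1, s.2)
        else if PySem.List.pyGetD line (i - 1) "" == ai then (0, s.2 + pvVal s.1)
        else if PySem.List.pyGetD line (i - 1) "" == pl then (0, s.2 - pvVal s.1)
        else (0, s.2)) (count, u)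
    = scanA ai pl (line.getD (k - 1) "") (line.drop k) count u := by
  induction m with
  | zero =>
    intro k hk1 hk2 hm count u
    have hk : k = line.length := by omega
    rw [PySem.List.pyRange_one_eq_nil (by omega)]
    simp [hk, scanA]
  | succ m ih =>
    intro k hk1 hk2 hm count u
    have hklt : k < line.length := by omega
    have hdrop : line.drop k = line.getD k "" :: line.drop (k + 1) := by
      rw [List.getD_eq_getElem line "" hklt]
      exact List.drop_eq_getElem_cons hklt
    rw [PySem.List.pyRange_one_cons (by exact_mod_cast hklt), List.foldl_cons]
    have hc1 : (k : Int) - 1 = ((k - 1 : Nat) : Int) := by omega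
    have hc2 : (k : Int) + 1 = ((k + 1 : Nat) : Int) := by omega
    simp only [hc1, hc2, PySem.List.pyGetD_natCast]
    rw [hdrop]
    simp only [scanA]
    have ih' := fun c u => ih (k + 1) (by omega) (by omega) (by omega) c u
    cases hb : (line.getD (k - 1) "" == line.getD k "") with
    | true =>
      have h1 := ih' (count + 1) u
      simp only [Nat.add_sub_cancel] at h1
      simp
      simpa using h1
    | false =>
      cases ha : (line.getD (k - 1) "" == ai) with
      | true =>
        have h1 := ih' 0 (u + pvVal count)
        simp only [Nat.add_sub_cancel] at h1
        simp
        simpa using h1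
      | false =>
        cases hp : (line.getD (k - 1) "" == pl) with
        | true =>
          have h1 := ih' 0 (u - pvVal count)
          simp only [Nat.add_sub_cancel] at h1
          simp
          simpa using h1
        | false =>
          have h1 := ih' 0 u
          simp only [Nat.add_sub_cancel] at h1
          simp
          simpa using h1

-- A's final fixup applied to scanA's result equals scanFin, for a nonempty tail.
theorem finA (ai pl : String) (xs : List String) :
    ∀ (prev : String) (count : Nat) (u : Int), xs ≠ [] →
    (if (scanA ai pl prev xs count u).1 ≠ 0 then
       if (prev :: xs).getD ((prev :: xs).length - 2) "" == ai then
         (scanA ai pl prev xs count u).2 + pvVal (scanA ai pl prev xs count u).1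
       else if (prev :: xs).getD ((prev :: xs).length - 2) "" == pl then
         (scanA ai pl prev xs count u).2 - pvVal (scanA ai pl prev xs count u).1
       else (scanA ai pl prev xs count u).2
     else (scanA ai pl prev xs count u).2)
    = scanFin ai pl prev xs count u := by
  induction xs with
  | nil => intro prev count u h; exact absurd rfl h
  | cons x xs ih =>
    intro prev count u _
    cases xs with
    | nil =>
      by_cases he : (prev == x) = true
      · have hx : prev = x := by simpa using he
        simp [scanA, scanFin, hx]
      · simp only [scanA, scanFin, he]
        by_cases ha : (prev == ai) = true <;> by_cases hp : (prev == pl) = true <;>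
          simp [ha, hp, pvVal_zero]
    | cons y ys =>
      have hpen : (prev :: x :: y :: ys).getD ((prev :: x :: y :: ys).length - 2) ""
          = (x :: y :: ys).getD ((x :: y :: ys).length - 2) "" := by
        simp only [List.length_cons]
        have : ys.length + 1 + 1 + 1 - 2 = (ys.length + 1 + 1 - 2) + 1 := by omega
        rw [this, List.getD_cons_succ]
      rw [hpen]
      by_cases he : (prev == x) = true
      · simp only [scanA, scanFin, he, if_pos]
        exact ih x (count + 1) u (by simp)
      · simp only [scanA, scanFin, he]
        by_cases ha : (prev == ai) = true
        · simp only [ha, if_true]; exact ih x 0 (u + pvVal count) (by simp)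
        · simp only [ha]
          by_cases hp : (prev == pl) = true
          · simp only [hp, if_true]; exact ih x 0 (u - pvVal count) (by simp)
          · simp only [hp]; exact ih x 0 u (by simp)

-- Per-line equality of the two fold bodies.
theorem lineEq (ai pl : String) (line : List String) (u : Int) :
    (if line.length > 1 then
      let s := (PySem.List.pyRange 1 (line.length : Int) 1).foldl
        (fun (s : Nat × Int) (i : Int) =>
          if PySem.List.pyGetD line (i - 1) "" == PySem.List.pyGetD line i "" then
            (s.1 + 1, s.2)
          else if PySem.List.pyGetD line (i - 1) "" == ai then (0, s.2 + pvVal s.1)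
          else if PySem.List.pyGetD line (i - 1) "" == pl then (0, s.2 - pvVal s.1)
          else (0, s.2)) (0, u)
      if s.1 ≠ 0 then
        if PySem.List.pyGetD line ((line.length : Int) - 2) "" == ai then s.2 + pvVal s.1
        else if PySem.List.pyGetD line ((line.length : Int) - 2) "" == pl then s.2 - pvVal s.1
        else s.2
      else s.2
    else u)
    = (pvRuns line).foldl (fun total g =>
        if g.1 == ai then total + pvVal (g.2 - 1)
        else if g.1 == pl then total - pvVal (g.2 - 1)
        else total) u := by
  match line with
  | [] => simp [pvRuns]
  | [c] =>
    simp only [List.length_cons, List.length_nil]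
    rw [pvRuns_cons]
    simp [runsGo, pvVal_zero]
  | c :: x :: xs =>
    have hlen : (c :: x :: xs).length > 1 := by simp
    rw [if_pos hlen]
    have hfold := foldA_idx ai pl (c :: x :: xs) ((c :: x :: xs).length - 1) 1
      (by omega) (by simp) rfl 0 u
    simp only [Nat.cast_one] at hfold
    rw [hfold]
    have hc2 : ((c :: x :: xs).length : Int) - 2 = (((c :: x :: xs).length - 2 : Nat) : Int) := by
      simp only [List.length_cons]; omega
    rw [hc2, PySem.List.pyGetD_natCast]
    have hfin := finA ai pl ((c :: x :: xs).drop 1) ((c :: x :: xs).getD 0 "") 0 u (by simp)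
    simp only [List.drop_one, List.tail_cons, List.getD_cons_zero] at hfin
    rw [pvRuns_cons, foldB_runsGo ai pl (x :: xs) c 0 u]
    exact hfin
  
theorem utilityValue_eq_alt (lines : List (List String)) (ai pl : String) :
    utilityValue lines ai pl = utilityValue_alt lines ai pl := by
  unfold utilityValue utilityValue_alt
  suffices h : ∀ u : Int,
      lines.foldl (fun utility line =>
        if line.length > 1 then
          let s := (PySem.List.pyRange 1 (line.length : Int) 1).foldl
            (fun (s : Nat × Int) (i : Int) =>
              if PySem.List.pyGetD line (i - 1) "" == PySem.List.pyGetD line i "" then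
                (s.1 + 1, s.2)
              else if PySem.List.pyGetD line (i - 1) "" == ai then (0, s.2 + pvVal s.1)
              else if PySem.List.pyGetD line (i - 1) "" == pl then (0, s.2 - pvVal s.1)
              else (0, s.2)) (0, utility)
          if s.1 ≠ 0 then
            if PySem.List.pyGetD line ((line.length : Int) - 2) "" == ai then s.2 + pvVal s.1
            else if PySem.List.pyGetD line ((line.length : Int) - 2) "" == pl then s.2 - pvVal s.1
            else s.2
          else s.2
        else utility) u
      = lines.foldl (fun total line =>
          (pvRuns line).foldl (fun total g =>
            if g.1 == ai then total + pvVal (g.2 - 1)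
            else if g.1 == pl then total - pvVal (g.2 - 1)
            else total) total) u by
    exact h 0
  induction lines with
  | nil => intro u; rfl
  | cons l ls ih =>
    intro u
    simp only [List.foldl_cons]
    rw [lineEq ai pl l u]
    exact ih _

-- ===== VERDICT (by name: the statement is the Claim_ definition above) =====
theorem utilityValue_spec : Claim_equal_utilityValue := by
  intro lines ai pl _ _
  unfold Spec_utilityValue
  exact utilityValue_eq_alt lines ai pl
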